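-- pv_equiv track=rewrite | github.com/davidhdx/wiki-database | modules/download.py | generateIsomorphicNames
-- ===== SOURCE A (Python) =====
-- def generateIsomorphicNames(file_list):
--     isomorphic_names = {}
--     name_counter = {}
--
--     for file in file_list:
--         base_name = file.split('.')[0]
--
--         if base_name in name_counter:
--             name_counter[base_name] += 1
--         else:
--             name_counter[base_name] = 1
--
--         if name_counter[base_name] > 1:
--             new_name = f"{base_name}-{name_counter[base_name]}"
--         else:
--             new_name = base_name
--
--         isomorphic_names[file] = new_name
--
--     return isomorphic_names
-- ===== SOURCE B (Python) =====
-- def generateIsomorphicNames(file_list):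
--     # group-then-assign: bucket the indices per base name, hand out ordinals
--     # group by group, then rebuild the dict in the original file order
--     pairs = [(f.split('.')[0], i) for i, f in enumerate(file_list)]
--     groups = {}
--     for b, i in pairs:
--         groups.setdefault(b, []).append(i)
--     names = [""] * len(file_list)
--     for b, idxs in groups.items():
--         for n, i in enumerate(idxs, 1):
--             names[i] = b if n == 1 else f"{b}-{n}"
--     return {f: names[i] for i, f in enumerate(file_list)}
-- ===== Notes on version B (the rewrite author's own statement) =====
-- stated objective: alternative
-- what changed: Replaces A's single pass with a running counter dict by a group-then-assign pipeline: bucket the indices of each base name into a dict of lists, hand out ordinals group by group into a positional names array, then rebuild the dict in original order.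
import Mathlib
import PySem

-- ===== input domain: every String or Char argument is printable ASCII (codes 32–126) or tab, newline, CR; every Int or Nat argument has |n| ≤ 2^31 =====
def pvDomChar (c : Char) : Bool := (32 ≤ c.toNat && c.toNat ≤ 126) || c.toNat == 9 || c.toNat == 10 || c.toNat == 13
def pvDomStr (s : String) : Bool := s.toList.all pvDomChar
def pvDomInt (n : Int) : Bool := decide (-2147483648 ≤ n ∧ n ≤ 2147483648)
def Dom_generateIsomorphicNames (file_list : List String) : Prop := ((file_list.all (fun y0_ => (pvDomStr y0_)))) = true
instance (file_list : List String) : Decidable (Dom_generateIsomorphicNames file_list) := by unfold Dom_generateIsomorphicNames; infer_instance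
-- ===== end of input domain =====

-- B replaces A's single pass with a running counter dict by a group-then-assign pipeline (bucket indices per base, assign ordinals group by group into a names array, rebuild in original order); alternative decomposition, not faster.


-- ===== PORT A =====
-- file.split('.')[0], the same expression in both Pythons: the separator "." is nonempty so
-- split? is always `some`, and the parts list is never empty so [0] is exactly pyGetD 0.
def pvSplitKey (s : String) : String :=
  PySem.List.pyGetD ((PySem.Str.split? s ".").getD []) 0 ""

-- A's loop body over the pair (isomorphic_names, name_counter).
-- name_counter[base] += 1 runs only when base is present, so Dict.modify base 0 (·+1) is exact there.
def pvStepA (st : PySem.Dict String String × PySem.Dict String Int) (file : String) :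
    PySem.Dict String String × PySem.Dict String Int :=
  let base := pvSplitKey file
  let counter := if st.2.contains base then st.2.modify base 0 (· + 1) else st.2.insert base 1
  let new_name := if counter.getD base 0 > 1 then base ++ "-" ++ PySem.Int.toStr (counter.getD base 0) else base
  (st.1.insert file new_name, counter)

def generateIsomorphicNames (file_list : List String) : List (String × String) :=
  (file_list.foldl pvStepA (PySem.Dict.empty, PySem.Dict.empty)).1.items

-- ===== PORT B =====
-- pairs = [(f.split('.')[0], i) for i, f in enumerate(file_list)]
def pvPairs (file_list : List String) : List (String × Int) :=
  (PySem.List.enumerate file_list).map (fun p => (pvSplitKey p.2, p.1))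

-- groups.setdefault(b, []).append(i): in place this is exactly groups[b] = groups.get(b, []) + [i], i.e. Dict.modify
def pvGroups (file_list : List String) : PySem.Dict String (List Int) :=
  (pvPairs file_list).foldl (fun d q => d.modify q.1 [] (· ++ [q.2])) PySem.Dict.empty

-- the inner loop: for n, i in enumerate(idxs, 1): names[i] = b if n == 1 else f"{b}-{n}"
def pvAssign (nm : List String) (g : String × List Int) : List String :=
  (PySem.List.enumerate g.2 1).foldl
    (fun nm q => PySem.List.pySetD nm q.2
      (if q.1 == 1 then g.1 else g.1 ++ "-" ++ PySem.Int.toStr q.1)) nm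

-- names = [""] * len(file_list); for b, idxs in groups.items(): … (inner loop above)
def pvNames (file_list : List String) : List String :=
  (pvGroups file_list).items.foldl pvAssign (List.replicate file_list.length "")

-- return {f: names[i] for i, f in enumerate(file_list)}
def generateIsomorphicNames_alt (file_list : List String) : List (String × String) :=
  ((PySem.List.enumerate file_list).foldl
    (fun d p => d.insert p.2 (PySem.List.pyGetD (pvNames file_list) p.1 "")) PySem.Dict.empty).items

-- ===== PRECONDITION & SPEC =====
def Spec_generateIsomorphicNames (file_list : List String) (out : List (String × String)) : Prop := out = generateIsomorphicNames_alt file_list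
instance (file_list : List String) (out : List (String × String)) : Decidable (Spec_generateIsomorphicNames file_list out) := by unfold Spec_generateIsomorphicNames; infer_instance

-- ===== CLAIM (what is proved, stated in full; the proofs are below) =====
def Claim_equal_generateIsomorphicNames : Prop := ∀ (file_list : List String), Dom_generateIsomorphicNames file_list → Spec_generateIsomorphicNames file_list (generateIsomorphicNames file_list)

-- ===== LEMMAS AND PROOFS =====

/-- Proof-side reference: the prefix-scan formulation both ports are reduced to. -/
def pvStepB (file_list : List String) (iso : PySem.Dict String String) (p : Int × String) :
    PySem.Dict String String :=
  let base := pvSplitKey p.2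
  let n : Int := 1 + ((PySem.List.slice file_list none (some p.1)).countP
      (fun prev => pvSplitKey prev == base))
  iso.insert p.2 (if n == 1 then base else base ++ "-" ++ PySem.Int.toStr n)

/-- How many files in `pre` share base `b`. -/
def pvCnt (pre : List String) (b : String) : Nat := pre.countP (fun p => pvSplitKey p == b)

lemma pvCnt_append (pre : List String) (x : String) (b : String) :
    pvCnt (pre ++ [x]) b = pvCnt pre b + (if pvSplitKey x = b then 1 else 0) := by
  simp [pvCnt, List.countP_append, List.countP_cons]

/-- Main invariant: running A's loop on the suffix `l` after the processed prefix `pre`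
    (counter holding exactly the prefix counts) yields the iso dict the reference fold builds. -/
lemma pvMain (l : List String) : ∀ (pre : List String)
    (iso : PySem.Dict String String) (counter : PySem.Dict String Int),
    (∀ b, counter.getD b 0 = (pvCnt pre b : Int)) →
    (∀ b, counter.contains b = (pvCnt pre b != 0)) →
    (l.foldl pvStepA (iso, counter)).1 =
      (PySem.List.enumerate l (pre.length : Int)).foldl (pvStepB (pre ++ l)) iso := by
  induction l with
  | nil => intro pre iso counter _ _; simp [PySem.List.enumerate_nil]
  | cons x t ih =>
    intro pre iso counter h1 h2
    rw [PySem.List.enumerate_cons, List.foldl_cons, List.foldl_cons]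
    have hslice : PySem.List.slice (pre ++ x :: t) none (some (pre.length : Int)) = pre := by
      rw [PySem.List.slice_to] <;> simp
    set base := pvSplitKey x with hb
    have hcount : ((PySem.List.slice (pre ++ x :: t) none (some (pre.length : Int))).countP
        (fun prev => pvSplitKey prev == base)) = pvCnt pre base := by
      rw [hslice]; rfl
    set counter' := if counter.contains base then counter.modify base 0 (· + 1)
      else counter.insert base 1 with hc'
    have hstep : pvStepA (iso, counter) x = (pvStepB (pre ++ x :: t) iso ((pre.length : Int), x), counter') := by
      simp only [pvStepA, pvStepB, ← hb, ← hc', hcount]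
      congr 1
      by_cases hz : pvCnt pre base = 0
      · have hcf : counter.contains base = false := by rw [h2]; simp [hz]
        rw [hc', hcf]
        simp [PySem.Dict.getD_insert_self, hz]
      · have hct : counter.contains base = true := by rw [h2]; simp [hz]
        rw [hc', hct]
        simp only [if_true, PySem.Dict.getD_modify_self, h1]
        have hg : ((pvCnt pre base : Int) + 1 > 1) := by omega
        have hne : ((1 + (pvCnt pre base : Int)) == 1) = false := by simp; omega
        simp only [hg, if_true, hne, Bool.false_eq_true, if_false]
        have : (pvCnt pre base : Int) + 1 = 1 + (pvCnt pre base : Int) := by omega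
        rw [this]
    rw [hstep]
    have h1' : ∀ b, counter'.getD b 0 = (pvCnt (pre ++ [x]) b : Int) := by
      intro b
      rw [pvCnt_append, hc']
      by_cases hz : pvCnt pre base = 0
      · have hcf : counter.contains base = false := by rw [h2]; simp [hz]
        rw [hcf]
        simp only [Bool.false_eq_true, if_false, PySem.Dict.getD_insert]
        by_cases hbb : b = base
        · subst hbb; simp [hz, ← hb]
        · simp [hbb, ← hb, Ne.symm hbb, h1]
      · have hct : counter.contains base = true := by rw [h2]; simp [hz]
        rw [hct]
        simp only [if_true, PySem.Dict.getD_modify]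
        by_cases hbb : b = base
        · subst hbb; simp [h1, ← hb]
        · simp [hbb, ← hb, Ne.symm hbb, h1]
    have h2' : ∀ b, counter'.contains b = (pvCnt (pre ++ [x]) b != 0) := by
      intro b
      rw [pvCnt_append, hc']
      by_cases hz : pvCnt pre base = 0
      · have hcf : counter.contains base = false := by rw [h2]; simp [hz]
        rw [hcf]
        simp only [Bool.false_eq_true, if_false, PySem.Dict.contains_insert]
        by_cases hbb : b = base
        · subst hbb; simp [← hb]
        · simp [hbb, ← hb, Ne.symm hbb, h2]
      · have hct : counter.contains base = true := by rw [h2]; simp [hz]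
        rw [hct]
        simp only [if_true, PySem.Dict.contains_modify]
        by_cases hbb : b = base
        · subst hbb; simp [← hb]
        · simp [hbb, ← hb, Ne.symm hbb, h2]
    have hrec := ih (pre ++ [x]) (pvStepB (pre ++ x :: t) iso ((pre.length : Int), x)) counter' h1' h2'
    rw [hrec]
    have hlen : ((pre ++ [x]).length : Int) = (pre.length : Int) + 1 := by
      simp
    rw [hlen, List.append_assoc]
    rfl

-- B-side lemmas: characterise the buckets and the effect of the assignment loops.

/-- The index bucket stored for base `b`. -/
lemma pvGroups_getD (fl : List String) (b : String) :
    (pvGroups fl).getD b [] = ((pvPairs fl).filter (fun q => q.1 == b)).map (·.2) := by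
  unfold pvGroups
  rw [PySem.Dict.getD_foldl_modify_append]
  simp

lemma pvGroups_keys (fl : List String) :
    (pvGroups fl).keys = PySem.Set.ofList ((pvPairs fl).map (·.1)) := by
  unfold pvGroups
  rw [PySem.Dict.keys_foldl_modify_key]
  simp [PySem.Set.update, PySem.Set.ofList_eq_foldl]

lemma pvGroups_nodup (fl : List String) : (pvGroups fl).keys.Nodup := by
  rw [pvGroups_keys]; exact PySem.Set.nodup_ofList _

/-- First projections of the pairs are the base names in order. -/
lemma pvPairs_fst (fl : List String) : (pvPairs fl).map (·.1) = fl.map pvSplitKey := by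
  unfold pvPairs
  rw [List.map_map]
  conv_rhs => rw [← PySem.List.map_snd_enumerate fl 0, List.map_map]
  rfl

/-- The loop body of pvAssign, named for the lemmas below. -/
def pvSetStep (b : String) (nm : List String) (q : Int × Int) : List String :=
  PySem.List.pySetD nm q.2 (if q.1 == 1 then b else b ++ "-" ++ PySem.Int.toStr q.1)

lemma pvAssign_eq (nm : List String) (g : String × List Int) :
    pvAssign nm g = (PySem.List.enumerate g.2 1).foldl (pvSetStep g.1) nm := rfl

lemma pvFold_length (b : String) : ∀ (l : List (Int × Int)) (nm : List String),
    (l.foldl (pvSetStep b) nm).length = nm.length := by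
  intro l
  induction l with
  | nil => intro nm; rfl
  | cons q t ih =>
    intro nm
    rw [List.foldl_cons, ih]
    exact PySem.List.length_pySetD _ _ _

/-- Setting only indices other than k leaves position k alone. -/
lemma pvFold_miss (b : String) (k : Nat) : ∀ (l : List (Int × Int)) (nm : List String),
    (∀ q ∈ l, q.2 ≠ (k : Int) ∧ 0 ≤ q.2) →
    (l.foldl (pvSetStep b) nm).getD k "" = nm.getD k "" := by
  intro l
  induction l with
  | nil => intro nm _; rfl
  | cons q t ih =>
    intro nm hq
    rw [List.foldl_cons, ih _ (fun q hq' => hq q (List.mem_cons_of_mem _ hq'))]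
    have h1 := hq q (List.mem_cons_self ..)
    unfold pvSetStep
    rw [PySem.List.pySetD_of_nonneg _ _ h1.2]
    have hne : q.2.toNat ≠ k := by omega
    simp [List.getD_eq_getElem?_getD, List.getElem?_set_ne hne]

/-- pvAssign leaves position k alone when none of its indices is k. -/
lemma pvAssign_miss (nm : List String) (g : String × List Int) (k : Nat)
    (h : ∀ i ∈ g.2, i ≠ (k : Int) ∧ 0 ≤ i) :
    (pvAssign nm g).getD k "" = nm.getD k "" := by
  rw [pvAssign_eq]
  apply pvFold_miss
  intro q hq
  rcases (PySem.List.mem_enumerate_iff _ _ _).1 hq with ⟨t, ht, rfl⟩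
  exact h _ (List.getElem_mem ht)

/-- pvAssign at position k, when k occurs once in the bucket: k gets the ordinal name. -/
lemma pvAssign_hit (nm : List String) (b : String) (u w : List Int) (k : Nat)
    (hw : ∀ i ∈ w, i ≠ (k : Int) ∧ 0 ≤ i) (hk : k < nm.length) :
    (pvAssign nm (b, u ++ (k : Int) :: w)).getD k "" =
      (if ((1 + (u.length : Int)) == 1) then b
       else b ++ "-" ++ PySem.Int.toStr (1 + (u.length : Int))) := by
  rw [pvAssign_eq]
  rw [PySem.List.enumerate_append, PySem.List.enumerate_cons, List.foldl_append, List.foldl_cons]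
  rw [pvFold_miss]
  · show (pvSetStep b _ (1 + (u.length : Int), (k : Int))).getD k "" = _
    have hlt : k < ((PySem.List.enumerate u 1).foldl (pvSetStep b) nm).length := by
      rw [pvFold_length]; exact hk
    rw [pvSetStep, PySem.List.pySetD_natCast, List.getD_eq_getElem?_getD,
      List.getElem?_set_self']
    simp [List.getElem?_eq_getElem hlt]
  · intro q hq
    rcases (PySem.List.mem_enumerate_iff _ _ _).1 hq with ⟨t, ht, rfl⟩
    exact hw _ (List.getElem_mem ht)

lemma pvAssign_length (nm : List String) (g : String × List Int) :
    (pvAssign nm g).length = nm.length := by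
  rw [pvAssign_eq]; exact pvFold_length _ _ _

/-- Outer fold over buckets never changes the length. -/
lemma pvOuter_length : ∀ (gs : List (String × List Int)) (nm : List String),
    (gs.foldl pvAssign nm).length = nm.length := by
  intro gs
  induction gs with
  | nil => intro nm; rfl
  | cons g t ih => intro nm; rw [List.foldl_cons, ih, pvAssign_length]

/-- Outer fold over buckets that avoid index k leaves position k alone. -/
lemma pvOuter_miss (k : Nat) : ∀ (gs : List (String × List Int)) (nm : List String),
    (∀ g ∈ gs, ∀ i ∈ g.2, i ≠ (k : Int) ∧ 0 ≤ i) →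
    (gs.foldl pvAssign nm).getD k "" = nm.getD k "" := by
  intro gs
  induction gs with
  | nil => intro nm _; rfl
  | cons g t ih =>
    intro nm h
    rw [List.foldl_cons, ih _ (fun g' hg' => h g' (List.mem_cons_of_mem _ hg')),
      pvAssign_miss _ _ _ (h g (List.mem_cons_self ..))]

/-- Every index in the bucket of b' is the position of a file whose base is b'. -/
lemma pvBucket_mem (fl : List String) (b' : String) (i : Int)
    (h : i ∈ (pvGroups fl).getD b' []) :
    ∃ j : Nat, j < fl.length ∧ i = (j : Int) ∧ pvSplitKey (fl.getD j "") = b' := by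
  rw [pvGroups_getD] at h
  rcases List.mem_map.1 h with ⟨q, hq, rfl⟩
  rcases List.mem_filter.1 hq with ⟨hq1, hq2⟩
  rcases List.mem_map.1 hq1 with ⟨p, hp, rfl⟩
  rcases (PySem.List.mem_enumerate_iff _ _ _).1 hp with ⟨j, hj, rfl⟩
  refine ⟨j, hj, by simp, ?_⟩
  rw [List.getD_eq_getElem?_getD, List.getElem?_eq_getElem hj]
  simpa using hq2

-- B-side characterisation: names[k] is the prefix-scan name, for every k < length.
lemma pvNames_spec (fl : List String) (k : Nat) (hk : k < fl.length) :
    (pvNames fl).getD k "" =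
      (let b := pvSplitKey (fl.getD k "")
       let n : Int := 1 + (pvCnt (fl.take k) b : Int)
       if n == 1 then b else b ++ "-" ++ PySem.Int.toStr n) := by
  have hb : pvSplitKey (fl.getD k "") = pvSplitKey fl[k] := by
    rw [List.getD_eq_getElem?_getD, List.getElem?_eq_getElem hk]; rfl
  set b := pvSplitKey fl[k] with hbdef
  have hfl : fl = fl.take k ++ fl[k] :: fl.drop (k+1) := by
    conv_lhs => rw [← List.take_append_drop k fl, List.drop_eq_getElem_cons hk]
  have hpairs : pvPairs fl =
      (PySem.List.enumerate (fl.take k)).map (fun p => (pvSplitKey p.2, p.1))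
      ++ (b, (k : Int)) :: (PySem.List.enumerate (fl.drop (k+1)) ((k : Int)+1)).map
        (fun p => (pvSplitKey p.2, p.1)) := by
    unfold pvPairs
    conv_lhs => rw [hfl]
    rw [PySem.List.enumerate_append, PySem.List.enumerate_cons, List.map_append, List.map_cons]
    have hl : (fl.take k).length = k := by simp [hk.le]
    rw [hl]
    norm_num
    exact hbdef.symm
  set P1f := ((((PySem.List.enumerate (fl.take k)).map
      (fun p => (pvSplitKey p.2, p.1))).filter (fun q => q.1 == b)).map
      (fun q => q.2)) with hP1fdef
  set P2f := ((((PySem.List.enumerate (fl.drop (k+1)) ((k : Int)+1)).map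
      (fun p => (pvSplitKey p.2, p.1))).filter (fun q => q.1 == b)).map
      (fun q => q.2)) with hP2fdef
  have hbucket : (pvGroups fl).getD b [] = P1f ++ (k : Int) :: P2f := by
    rw [pvGroups_getD, hpairs, List.filter_append, List.filter_cons]
    simp only [beq_self_eq_true, if_true]
    rw [List.map_append, List.map_cons]
  have hP1f : P1f.length = pvCnt (fl.take k) b := by
    rw [hP1fdef, List.length_map, ← List.countP_eq_length_filter, List.countP_map]
    have : (PySem.List.enumerate (fl.take k)).countP
          ((fun q => q.1 == b) ∘ (fun p => (pvSplitKey p.2, p.1))) =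
        ((PySem.List.enumerate (fl.take k)).map (fun p => p.2)).countP
          (fun x => pvSplitKey x == b) := by
      rw [List.countP_map]; rfl
    rw [this, PySem.List.map_snd_enumerate]
    rfl
  have hP2f : ∀ i ∈ P2f, i ≠ (k : Int) ∧ 0 ≤ i := by
    intro i hi
    rcases List.mem_map.1 hi with ⟨q, hq, rfl⟩
    rcases List.mem_filter.1 hq with ⟨hq1, _⟩
    rcases List.mem_map.1 hq1 with ⟨p, hp, rfl⟩
    rcases (PySem.List.mem_enumerate_iff _ _ _).1 hp with ⟨t, ht, rfl⟩
    constructor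
    · intro hc
      simp only at hc
      omega
    · simp only []
      omega
  have hnd := pvGroups_nodup fl
  have hbk : b ∈ (pvGroups fl).keys := by
    rw [pvGroups_keys, pvPairs_fst]
    exact (PySem.Set.mem_ofList _ _).2 (List.mem_map_of_mem (List.getElem_mem hk))
  rcases List.append_of_mem hbk with ⟨K1, K2, hkeys⟩
  have hnd' := hnd
  rw [hkeys] at hnd'
  have hbK1 : b ∉ K1 := fun h =>
    (List.disjoint_of_nodup_append hnd') h (List.mem_cons_self ..)
  have hbK2 : b ∉ K2 := (List.nodup_cons.mp (List.nodup_append.mp hnd').2.1).1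
  have hmiss : ∀ (K : List String), b ∉ K →
      ∀ g ∈ K.map (fun b' => (b', (pvGroups fl).getD b' [])), ∀ i ∈ g.2,
        i ≠ (k : Int) ∧ 0 ≤ i := by
    intro K hbK g hg i hi
    rcases List.mem_map.1 hg with ⟨b', hb', rfl⟩
    rcases pvBucket_mem fl b' i hi with ⟨j, hj, rfl, hbase⟩
    refine ⟨fun hc => ?_, by positivity⟩
    have hjk : j = k := by exact_mod_cast hc
    subst hjk
    rw [hb] at hbase
    exact hbK (hbase ▸ hb')
  unfold pvNames
  rw [PySem.Dict.items_eq_map_keys _ hnd [], hkeys, List.map_append, List.map_cons,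
    List.foldl_append, List.foldl_cons]
  rw [pvOuter_miss _ _ _ (hmiss K2 hbK2)]
  have hk' : k < ((K1.map (fun b' => (b', (pvGroups fl).getD b' []))).foldl pvAssign
      (List.replicate fl.length "")).length := by
    rw [pvOuter_length, List.length_replicate]; exact hk
  rw [hbucket, pvAssign_hit _ _ _ _ _ hP2f hk', hP1f]
  simp only [hb]

-- ===== VERDICT (by name: the statement is the Claim_ definition above) =====
theorem generateIsomorphicNames_spec : Claim_equal_generateIsomorphicNames := by
  intro file_list _
  unfold Spec_generateIsomorphicNames generateIsomorphicNames generateIsomorphicNames_alt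
  have hA := pvMain file_list [] PySem.Dict.empty PySem.Dict.empty
    (by intro b; simp [pvCnt]) (by intro b; simp [pvCnt])
  simp only [List.nil_append, List.length_nil, Nat.cast_zero] at hA
  rw [hA]
  congr 1
  apply PySem.List.foldl_congr_mem
  intro acc p hp
  rcases (PySem.List.mem_enumerate_iff _ _ _).1 hp with ⟨j, hj, rfl⟩
  have hslice : PySem.List.slice file_list none (some (j : Int)) = file_list.take j := by
    rw [PySem.List.slice_to] <;> simp
  simp only [pvStepB, zero_add, hslice, PySem.List.pyGetD_natCast]
  rw [pvNames_spec file_list j hj]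
  simp [pvCnt, List.getD_eq_getElem?_getD, hj]
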